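-- pv_equiv track=rewrite | github.com/chotarahat/CSE221-SUMMER-25--BRACU | Answers/A3_Second_Task.py | merge_sort_count
-- ===== SOURCE A (Python) =====
-- def count(sorted_list, x):
--     low = 0
--     high = len(sorted_list) - 1
--     while low <= high:
--         mid = (low + high) // 2
--         if sorted_list[mid] < x:
--             low = mid + 1
--         else:
--             high = mid - 1
--     return low
--
-- def merge_and_count(my_arr, start, middle, end):
--     total_count = 0
--
--     left = []
--     for i in range(start, middle + 1):
--         left.append(my_arr[i])
--
--     right = []
--     for i in range(middle + 1, end + 1):
--         right.append(my_arr[i])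
--
--
--     squared_right = []
--     for m in right:
--         squared_right.append(m * m)
--     squared_right.sort()
--
--
--     for n in left:
--         total_count += count(squared_right, n)
--
--
--     i = 0
--     j = 0
--     k = start
--     while i < len(left) and j < len(right):
--         if left[i] <= right[j]:
--             my_arr[k] = left[i]
--             i = i + 1
--         else:
--             my_arr[k] = right[j]
--             j = j + 1
--         k = k + 1
--
--     while i < len(left):
--         my_arr[k] = left[i]
--         i = i + 1
--         k = k + 1
--
--     while j < len(right):
--         my_arr[k] = right[j]
--         j = j + 1
--         k = k + 1
--     return total_count
--
-- def merge_sort_count(my_arr, start, end):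
--     count = 0
--     if start < end:
--         middle = (start + end) // 2
--         count = count + merge_sort_count(my_arr, start, middle)
--         count = count + merge_sort_count(my_arr, middle + 1, end)
--         count = count + merge_and_count(my_arr, start, middle, end)
--     return count
-- ===== SOURCE B (Python) =====
-- def merge_sort_count(my_arr, start, end):
--     # Direct pair count over the segment; does not mutate my_arr
--     # (A additionally sorts my_arr[start:end+1] in place).
--     if start >= end:
--         return 0
--     total = 0
--     rest = my_arr[start:end + 1]
--     while rest:
--         x = rest.pop(0)
--         for y in rest:
--             if x > y * y:
--                 total += 1
--     return total
-- ===== Notes on version B (the rewrite author's own statement) =====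
-- stated objective: simpler
-- what changed: Replaces the recursive merge sort with per-merge binary searches over sorted squares (which also sorts the array in place) by a direct two-loop pair count over the slice my_arr[start:end+1], with no mutation of my_arr.
-- outside the precondition, e.g. on merge_sort_count([2, 1], -2, 1): A returns 2, B returns 1
import Mathlib
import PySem

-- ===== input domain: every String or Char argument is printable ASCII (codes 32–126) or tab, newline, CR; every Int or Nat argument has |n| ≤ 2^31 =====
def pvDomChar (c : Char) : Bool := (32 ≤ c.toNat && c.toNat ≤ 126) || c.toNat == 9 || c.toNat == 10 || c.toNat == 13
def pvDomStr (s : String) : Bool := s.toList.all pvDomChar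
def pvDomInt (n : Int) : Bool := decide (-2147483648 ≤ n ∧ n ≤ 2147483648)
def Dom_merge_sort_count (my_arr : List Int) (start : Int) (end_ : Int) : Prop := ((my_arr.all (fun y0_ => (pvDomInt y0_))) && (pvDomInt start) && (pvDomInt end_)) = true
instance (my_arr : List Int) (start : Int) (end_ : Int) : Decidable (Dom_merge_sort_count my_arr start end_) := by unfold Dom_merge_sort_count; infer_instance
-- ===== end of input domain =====

-- B replaces A's recursive merge sort with per-merge binary searches by a direct
-- two-loop pair count over the slice (simpler, not faster). A also sorts
-- my_arr[start:end+1] in place; B does not mutate my_arr — the equivalence proved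
-- here is about the RETURN value only.

-- ===== PORT A =====
-- A's helper `count` (hand-written binary search): the while loop, step for step.
-- (`fuel` is a totality guard only; it bounds the loop's iteration count, which
-- shrinks by at least one per step, and is chosen large enough at the call site.)
def pvCountLoop (s : List Int) (x : Int) : Nat → Int → Int → Int
  | 0, low, _ => low
  | fuel + 1, low, high =>
      if low ≤ high then
        let mid := PySem.Int.floordiv (low + high) 2
        if PySem.List.pyGetD s mid 0 < x then
          pvCountLoop s x fuel (mid + 1) high
        else
          pvCountLoop s x fuel low (mid - 1)
      else low

def pvCount (sorted_list : List Int) (x : Int) : Int :=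
  pvCountLoop sorted_list x (sorted_list.length + 1) 0 ((sorted_list.length : Int) - 1)

-- writes src[i..] at positions k, k+1, …: each of A's two trailing while loops
def pvCopyFrom : Nat → List Int → List Int → Nat → Int → List Int
  | 0, arr, _, _, _ => arr
  | fuel + 1, arr, src, i, k =>
      if h : i < src.length then
        pvCopyFrom fuel (PySem.List.pySetD arr k src[i]) src (i + 1) (k + 1)
      else arr

-- A's main merge-back while loop (i, j are Python's nonnegative counters)
def pvMergeLoop : Nat → List Int → List Int → List Int → Nat → Nat → Int → List Int
  | 0, arr, _, _, _, _, _ => arr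
  | fuel + 1, arr, left, right, i, j, k =>
      if h : i < left.length ∧ j < right.length then
        if left[i] ≤ right[j] then
          pvMergeLoop fuel (PySem.List.pySetD arr k left[i]) left right (i + 1) j (k + 1)
        else
          pvMergeLoop fuel (PySem.List.pySetD arr k right[j]) left right i (j + 1) (k + 1)
      else
        pvCopyFrom right.length
          (pvCopyFrom left.length arr left i k) right j (k + ((left.length - i : Nat) : Int))

-- A's merge_and_count: returns (updated array, total_count)
def pvMergeAndCount (arr : List Int) (start middle end_ : Int) : List Int × Int :=
  let left := (PySem.List.pyRange start (middle + 1) 1).map (fun i => PySem.List.pyGetD arr i 0)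
  let right := (PySem.List.pyRange (middle + 1) (end_ + 1) 1).map (fun i => PySem.List.pyGetD arr i 0)
  let squared_right := right.map (fun m => m * m)
  let sq := PySem.List.sorted squared_right (fun q => q) false
  let total := left.foldl (fun t n => t + pvCount sq n) 0
  (pvMergeLoop (left.length + right.length) arr left right 0 0 start, total)

-- A's merge_sort_count with the in-place mutation made explicit as state passing
-- (fuel bounds the recursion depth: each call strictly shrinks (end_ - start).toNat)
def pvMergeSortAux : Nat → List Int → Int → Int → List Int × Int
  | 0, arr, _, _ => (arr, 0)
  | fuel + 1, arr, start, end_ =>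
      if start < end_ then
        let middle := PySem.Int.floordiv (start + end_) 2
        let r1 := pvMergeSortAux fuel arr start middle
        let r2 := pvMergeSortAux fuel r1.1 (middle + 1) end_
        let r3 := pvMergeAndCount r2.1 start middle end_
        (r3.1, r1.2 + r2.2 + r3.2)
      else (arr, 0)

def merge_sort_count (my_arr : List Int) (start : Int) (end_ : Int) : Int :=
  (pvMergeSortAux ((end_ - start).toNat + 1) my_arr start end_).2

-- ===== PORT B =====
-- Source B's `while rest: x = rest.pop(0); for y in rest: …` loop
def pvBLoop (rest : List Int) (total : Int) : Int :=
  match rest with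
  | [] => total
  | x :: rest =>
      pvBLoop rest (rest.foldl (fun t y => if y * y < x then t + 1 else t) total)

def merge_sort_count_alt (my_arr : List Int) (start : Int) (end_ : Int) : Int :=
  if start ≥ end_ then 0
  else pvBLoop (PySem.List.slice my_arr (some start) (some (end_ + 1))) 0

-- ===== PRECONDITION & SPEC =====
-- Pre_ excludes the calls with start < end whose endpoints leave [0, len(my_arr)):
-- there an index ≥ len raises IndexError in A, and a negative endpoint triggers
-- Python's negative-index wraparound, on which A's reads and writes overlap — a
-- corner no caller would specify, where A's and B's values are both accidental.
def Pre_merge_sort_count (my_arr : List Int) (start : Int) (end_ : Int) : Prop :=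
  start < end_ → (0 ≤ start ∧ end_ < my_arr.length)
instance (my_arr : List Int) (start : Int) (end_ : Int) : Decidable (Pre_merge_sort_count my_arr start end_) := by unfold Pre_merge_sort_count; infer_instance

def pvWitness_merge_sort_count : List Int × Int × Int := ([5, -1, 2, 1], 0, 3)

def Spec_merge_sort_count (my_arr : List Int) (start : Int) (end_ : Int) (out : Int) : Prop := out = merge_sort_count_alt my_arr start end_
instance (my_arr : List Int) (start : Int) (end_ : Int) (out : Int) : Decidable (Spec_merge_sort_count my_arr start end_ out) := by unfold Spec_merge_sort_count; infer_instance

-- ===== CLAIM (what is proved, stated in full; the proofs are below) =====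
def Claim_equal_merge_sort_count : Prop := ∀ (my_arr : List Int) (start : Int) (end_ : Int), Dom_merge_sort_count my_arr start end_ → Pre_merge_sort_count my_arr start end_ → Spec_merge_sort_count my_arr start end_ (merge_sort_count my_arr start end_)


-- ===== LEMMAS AND PROOFS =====

-- the value B's loop computes: for each head, how many later elements have a
-- smaller square
def pvPairs : List Int → Int
  | [] => 0
  | x :: r => (r.countP (fun y => y * y < x) : Int) + pvPairs r

-- the number of cross pairs (n from l1, m from l2) with m² < n
def pvCross (l1 l2 : List Int) : Int :=
  (l1.map (fun n => ((l2.countP (fun m => m * m < n)) : Int))).sum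

-- the segment my_arr[s..e] (inclusive) as a list
def pvSeg (arr : List Int) (s e : Int) : List Int :=
  (arr.drop s.toNat).take (e.toNat + 1 - s.toNat)

lemma pvFoldCount (x : Int) (l : List Int) (t : Int) :
    l.foldl (fun t y => if y * y < x then t + 1 else t) t
      = t + (l.countP (fun y => y * y < x) : Int) := by
  induction l generalizing t with
  | nil => simp
  | cons y r ih =>
      simp only [List.foldl_cons, List.countP_cons, ih]
      by_cases h : y * y < x
      · simp [h]; push_cast; ring
      · simp [h]

lemma pvBLoop_eq (l : List Int) (t : Int) : pvBLoop l t = t + pvPairs l := by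
  induction l generalizing t with
  | nil => simp [pvBLoop, pvPairs]
  | cons x r ih =>
      simp only [pvBLoop, pvPairs, ih, pvFoldCount]
      omega

lemma pvCross_nil (l2 : List Int) : pvCross [] l2 = 0 := rfl

lemma pvCross_cons (x : Int) (l1 l2 : List Int) :
    pvCross (x :: l1) l2 = (l2.countP (fun m => m * m < x) : Int) + pvCross l1 l2 := by
  simp [pvCross]

lemma pvPairs_append (l1 l2 : List Int) :
    pvPairs (l1 ++ l2) = pvPairs l1 + pvCross l1 l2 + pvPairs l2 := by
  induction l1 with
  | nil => simp [pvPairs, pvCross_nil]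
  | cons x l1 ih =>
      simp only [List.cons_append, pvPairs, ih, List.countP_append, pvCross_cons]
      push_cast
      ring

lemma pvCross_perm_left {l1 l1' : List Int} (h : l1.Perm l1') (l2 : List Int) :
    pvCross l1 l2 = pvCross l1' l2 := by
  exact List.Perm.sum_eq (h.map _)

lemma pvCross_perm_right (l1 : List Int) {l2 l2' : List Int} (h : l2.Perm l2') :
    pvCross l1 l2 = pvCross l1 l2' := by
  unfold pvCross
  congr 1
  exact List.map_congr_left (fun n _ => by rw [h.countP_eq])

-- counting indices below a threshold: countP of a prefix-closed predicate
lemma pvCountP_of_split (s : List Int) (p : Int → Bool) (k : Nat) (hk : k ≤ s.length)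
    (h1 : ∀ i : Nat, i < k → (hi : i < s.length) → p s[i])
    (h2 : ∀ i : Nat, k ≤ i → (hi : i < s.length) → ¬ p s[i]) :
    s.countP p = k := by
  induction s generalizing k with
  | nil => simp only [List.length_nil, Nat.le_zero] at hk; simp [hk]
  | cons a t ih =>
      cases k with
      | zero =>
          rw [List.countP_eq_zero.2]
          intro x hx
          obtain ⟨i, hi, rfl⟩ := List.getElem_of_mem hx
          exact h2 _ (by omega) _
      | succ k =>
          have ha : p a = true := h1 0 (by omega) (by simp)
          rw [List.countP_cons_of_pos ha]
          rw [ih k (by simpa using hk)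
            (fun i hi hlt => by simpa using h1 (i+1) (by omega) (by simpa using hlt))
            (fun i hi hlt => by simpa using h2 (i+1) (by omega) (by simpa using hlt))]

-- A's binary search returns the number of elements < x of a sorted list
lemma pvCountLoop_eq (s : List Int) (x : Int)
    (hs : s.Pairwise (· ≤ ·)) :
    ∀ (fuel : Nat) (low high : Int), (high + 1 - low).toNat ≤ fuel →
    0 ≤ low → high < s.length → low ≤ high + 1 →
    (∀ i : Nat, (i : Int) < low → (hi : i < s.length) → s[i] < x) →
    (∀ i : Nat, high < (i : Int) → (hi : i < s.length) → ¬ s[i] < x) →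
    pvCountLoop s x fuel low high = (s.countP (fun v => v < x) : Int) := by
  intro fuel
  induction fuel with
  | zero =>
      intro low high hfuel h0 hhi hlh h1 h2
      simp only [pvCountLoop]
      rw [pvCountP_of_split s _ low.toNat (by omega)
        (fun i hi hilen => by simp only [decide_eq_true_eq]; exact h1 i (by omega) hilen)
        (fun i hi hilen => by simp only [decide_eq_true_eq]; exact fun hc => h2 i (by omega) hilen hc)]
      omega
  | succ fuel ih =>
      intro low high hfuel h0 hhi hlh h1 h2
      by_cases hle : low ≤ high
      case neg =>
          rw [pvCountLoop, if_neg hle]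
          rw [pvCountP_of_split s _ low.toNat (by omega)
            (fun i hi hilen => by simp only [decide_eq_true_eq]; exact h1 i (by omega) hilen)
            (fun i hi hilen => by simp only [decide_eq_true_eq]; exact fun hc => h2 i (by omega) hilen hc)]
          omega
      case pos =>
      have hmb := PySem.Int.floordiv_two_mid_bounds hle
      set mid := PySem.Int.floordiv (low + high) 2 with hmdef
      rw [pvCountLoop, if_pos hle]
      by_cases hmidlt : PySem.List.pyGetD s mid 0 < x
      · rw [if_pos hmidlt]
        apply ih (mid + 1) high (by omega) (by omega) hhi (by omega)
        · intro i hi hilen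
          have hmlen : mid.toNat < s.length := by omega
          have hle2 : s[i] ≤ s[mid.toNat] := by
            rcases lt_or_eq_of_le (by omega : i ≤ mid.toNat) with h | h
            · exact (List.pairwise_iff_getElem.1 hs) i mid.toNat hilen hmlen h
            · subst h; exact le_refl _
          have hm : PySem.List.pyGetD s mid 0 = s[mid.toNat] :=
            PySem.List.pyGetD_eq_getElem s 0 (by omega) (by omega)
          rw [hm] at hmidlt
          omega
        · exact h2
      · rw [if_neg hmidlt]
        apply ih low (mid - 1) (by omega) h0 (by omega) (by omega) h1
        · intro i hi hilen
          have hmlen : mid.toNat < s.length := by omega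
          have hm : PySem.List.pyGetD s mid 0 = s[mid.toNat] :=
            PySem.List.pyGetD_eq_getElem s 0 (by omega) (by omega)
          rw [hm] at hmidlt
          rcases lt_or_eq_of_le (by omega : mid.toNat ≤ i) with h | h
          · have := (List.pairwise_iff_getElem.1 hs) mid.toNat i hmlen hilen h
            omega
          · subst h; omega

lemma pvCount_eq (s : List Int) (x : Int) (hs : s.Pairwise (· ≤ ·)) :
    pvCount s x = (s.countP (fun v => v < x) : Int) := by
  unfold pvCount
  apply pvCountLoop_eq s x hs (s.length + 1) 0 _ (by omega) (by omega) (by omega) (by omega)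
  · intro i hi _; omega
  · intro i hi hilen; omega

-- reading my_arr[a..b) with 0 ≤ a ≤ b ≤ len is drop-take
lemma pvReadSegAux (arr : List Int) : ∀ (k : Nat) (a b : Int), 0 ≤ a → a ≤ b →
    b ≤ arr.length → (b - a).toNat = k →
    (PySem.List.pyRange a b 1).map (fun i => PySem.List.pyGetD arr i 0) =
      (arr.drop a.toNat).take k := by
  intro k
  induction k with
  | zero =>
      intro a b h0 hab hb hk
      rw [PySem.List.pyRange_one_eq_nil (by omega)]
      simp
  | succ k ih =>
      intro a b h0 hab hb hk
      rw [PySem.List.pyRange_one_cons (by omega : a < b)]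
      have hlt : a.toNat < arr.length := by omega
      rw [List.drop_eq_getElem_cons hlt, List.take_succ_cons, List.map_cons]
      rw [PySem.List.pyGetD_eq_getElem arr 0 h0 (by omega)]
      have h1 : (a + 1).toNat = a.toNat + 1 := by omega
      rw [ih (a + 1) b (by omega) (by omega) hb (by omega), h1]

lemma pvReadSeg (arr : List Int) (a b : Int) (h0 : 0 ≤ a) (hab : a ≤ b)
    (hb : b ≤ arr.length) :
    (PySem.List.pyRange a b 1).map (fun i => PySem.List.pyGetD arr i 0) =
      (arr.drop a.toNat).take (b - a).toNat :=
  pvReadSegAux arr (b - a).toNat a b h0 hab hb rfl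

-- sequential writes at k, k+1, … splice a block into the list
def pvWriteSeq (arr : List Int) (k : Int) (ws : List Int) : List Int :=
  match ws with
  | [] => arr
  | w :: ws => pvWriteSeq (PySem.List.pySetD arr k w) (k + 1) ws

lemma pvTakeSet (arr : List Int) (n : Nat) (w : Int) (h : n < arr.length) :
    (arr.set n w).take (n + 1) = arr.take n ++ [w] := by
  rw [List.set_eq_take_cons_drop w h, List.take_append]
  simp [List.length_take, Nat.min_eq_left (Nat.le_of_lt h)]

lemma pvWriteSeq_eq (ws : List Int) : ∀ (arr : List Int) (k : Int), 0 ≤ k →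
    k.toNat + ws.length ≤ arr.length →
    pvWriteSeq arr k ws = arr.take k.toNat ++ ws ++ arr.drop (k.toNat + ws.length) := by
  induction ws with
  | nil => intro arr k h0 hlen; simp [pvWriteSeq]
  | cons w ws ih =>
      intro arr k h0 hlen
      simp only [List.length_cons] at hlen
      have hklt : k.toNat < arr.length := by omega
      simp only [pvWriteSeq]
      rw [PySem.List.pySetD_of_nonneg arr w h0]
      rw [ih _ (k + 1) (by omega) (by simp; omega)]
      have hk : (k + 1).toNat = k.toNat + 1 := by omega
      rw [hk, pvTakeSet arr k.toNat w hklt,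
        List.drop_set_of_lt (by omega : k.toNat < k.toNat + 1 + ws.length)]
      have h6 : List.drop (k.toNat + 1 + ws.length) arr
          = List.drop (k.toNat + (w :: ws).length) arr := by
        congr 1
        simp only [List.length_cons]
        omega
      rw [h6]
      simp [List.append_assoc]

lemma pvWriteSeq_append (xs ys : List Int) : ∀ (arr : List Int) (k : Int),
    pvWriteSeq arr k (xs ++ ys) =
      pvWriteSeq (pvWriteSeq arr k xs) (k + (xs.length : Int)) ys := by
  induction xs with
  | nil => intro arr k; simp [pvWriteSeq]
  | cons x xs ih =>
      intro arr k
      simp only [List.cons_append, pvWriteSeq, ih, List.length_cons]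
      congr 1
      push_cast
      ring

lemma pvCopyFrom_eq (src : List Int) : ∀ (fuel : Nat) (i : Nat), src.length - i ≤ fuel →
    ∀ (arr : List Int) (k : Int),
    pvCopyFrom fuel arr src i k = pvWriteSeq arr k (src.drop i) := by
  intro fuel
  induction fuel with
  | zero =>
      intro i hf arr k
      rw [List.drop_eq_nil_of_le (by omega)]
      rfl
  | succ fuel ih =>
      intro i hf arr k
      rw [pvCopyFrom]
      by_cases h : i < src.length
      · rw [dif_pos h, List.drop_eq_getElem_cons h]
        simp only [pvWriteSeq]
        exact ih (i + 1) (by omega) _ _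
      · rw [dif_neg h, List.drop_eq_nil_of_le (by omega)]
        rfl

-- the pure merged sequence A's main while loop writes, starting from (i, j)
def pvMSuffix (left right : List Int) (i j : Nat) : List Int :=
  if h : i < left.length ∧ j < right.length then
    if left[i] ≤ right[j] then left[i] :: pvMSuffix left right (i + 1) j
    else right[j] :: pvMSuffix left right i (j + 1)
  else left.drop i ++ right.drop j
termination_by (left.length - i) + (right.length - j)

lemma pvMergeLoop_eq (left right : List Int) :
    ∀ (fuel : Nat) (i j : Nat), (left.length - i) + (right.length - j) ≤ fuel →
    ∀ (arr : List Int) (k : Int),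
    pvMergeLoop fuel arr left right i j k = pvWriteSeq arr k (pvMSuffix left right i j) := by
  intro fuel
  induction fuel with
  | zero =>
      intro i j hf arr k
      have h : ¬ (i < left.length ∧ j < right.length) := by omega
      rw [pvMSuffix, dif_neg h]
      rw [List.drop_eq_nil_of_le (by omega : left.length ≤ i),
        List.drop_eq_nil_of_le (by omega : right.length ≤ j)]
      rfl
  | succ fuel ih =>
      intro i j hf arr k
      rw [pvMergeLoop, pvMSuffix]
      by_cases h : i < left.length ∧ j < right.length
      · rw [dif_pos h, dif_pos h]
        by_cases hle : left[i] ≤ right[j]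
        · rw [if_pos hle, if_pos hle]
          simp only [pvWriteSeq]
          exact ih (i + 1) j (by omega) _ _
        · rw [if_neg hle, if_neg hle]
          simp only [pvWriteSeq]
          exact ih i (j + 1) (by omega) _ _
      · rw [dif_neg h, dif_neg h]
        rw [pvCopyFrom_eq left left.length i (by omega),
          pvCopyFrom_eq right right.length j (by omega),
          pvWriteSeq_append, List.length_drop]

lemma pvMSuffix_perm (left right : List Int) : ∀ (i j : Nat),
    (pvMSuffix left right i j).Perm (left.drop i ++ right.drop j) := by
  intro i j
  induction hn : (left.length - i) + (right.length - j) using Nat.strong_induction_on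
    generalizing i j with
  | _ n ih =>
      rw [pvMSuffix]
      by_cases h : i < left.length ∧ j < right.length
      · rw [dif_pos h]
        by_cases hle : left[i] ≤ right[j]
        · rw [if_pos hle]
          have := ih _ (by omega) (i+1) j rfl
          rw [List.drop_eq_getElem_cons h.1]
          exact (this.cons left[i])
        · rw [if_neg hle]
          have := ih _ (by omega) i (j+1) rfl
          refine ((this.cons right[j]).trans ?_)
          rw [List.drop_eq_getElem_cons h.2]
          exact List.perm_middle.symm
      · rw [dif_neg h]

lemma pvSeg_split (arr : List Int) (s m e : Int) (h0 : 0 ≤ s) (hsm : s ≤ m)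
    (hme : m < e) :
    pvSeg arr s e = pvSeg arr s m ++ pvSeg arr (m + 1) e := by
  unfold pvSeg
  have h1 : e.toNat + 1 - s.toNat = (m.toNat + 1 - s.toNat) + (e.toNat - m.toNat) := by omega
  rw [h1, List.take_add, List.drop_drop]
  congr 2
  · omega
  · congr 1
    omega

lemma pvPairs_short (l : List Int) (h : l.length ≤ 1) : pvPairs l = 0 := by
  match l, h with
  | [], _ => rfl
  | [x], _ => simp [pvPairs]

lemma pvSeg_eq_drop_take (x : List Int) (s m : Int) :
    pvSeg x s m = (x.take (m.toNat + 1)).drop s.toNat := by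
  unfold pvSeg
  rw [List.drop_take]

lemma pvDrop_mono {x y : List Int} {a b : Nat} (h : x.drop a = y.drop a)
    (hab : a ≤ b) : x.drop b = y.drop b := by
  have h2 := congrArg (List.drop (b - a)) h
  rw [List.drop_drop, List.drop_drop] at h2
  have hba : a + (b - a) = b := by omega
  rwa [hba] at h2

lemma pvTake_mono {x y : List Int} {a b : Nat} (h : x.take b = y.take b)
    (hab : a ≤ b) : x.take a = y.take a := by
  have : a = min a b := by omega
  rw [this, ← List.take_take, h, List.take_take]

theorem pvMergeSort_invariant : ∀ (fuel : Nat) (arr : List Int) (s e : Int),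
    (e - s).toNat < fuel → 0 ≤ s → e < (arr.length : Int) →
    (pvMergeSortAux fuel arr s e).1.length = arr.length ∧
    (pvMergeSortAux fuel arr s e).1.take s.toNat = arr.take s.toNat ∧
    (pvMergeSortAux fuel arr s e).1.drop (e.toNat + 1) = arr.drop (e.toNat + 1) ∧
    (pvSeg (pvMergeSortAux fuel arr s e).1 s e).Perm (pvSeg arr s e) ∧
    (pvMergeSortAux fuel arr s e).2 = pvPairs (pvSeg arr s e) := by
  intro fuel
  induction fuel with
  | zero => intro arr s e hn; omega
  | succ fuel ih =>
  intro arr s e hn h0 he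
  by_cases hlt : s < e
  case neg =>
    rw [pvMergeSortAux, if_neg hlt]
    refine ⟨rfl, rfl, rfl, List.Perm.refl _, ?_⟩
    rw [pvPairs_short]
    unfold pvSeg
    simp only [List.length_take, List.length_drop]
    omega
  case pos =>
    set m := PySem.Int.floordiv (s + e) 2 with hm
    have hmb := PySem.Int.floordiv_two_mid_bounds (by omega : s ≤ e)
    have hme : m < e := (PySem.Int.floordiv_lt_iff_lt_mul (a := s + e) (q := e)
      (by omega : (0:Int) < 2)).mpr (by omega)
    -- first recursive call
    obtain ⟨len1, pre1, suf1, perm1, c1⟩ :=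
      ih arr s m (by omega) h0 (by omega)
    set r1 := pvMergeSortAux fuel arr s m with hr1
    -- second recursive call
    obtain ⟨len2, pre2, suf2, perm2, c2⟩ :=
      ih r1.1 (m + 1) e (by omega) (by omega) (by omega)
    set r2 := pvMergeSortAux fuel r1.1 (m + 1) e with hr2
    have hm1 : (m + 1).toNat = m.toNat + 1 := by omega
    -- the right segment was untouched by the first call
    have segR1 : pvSeg r1.1 (m + 1) e = pvSeg arr (m + 1) e := by
      unfold pvSeg
      rw [hm1, suf1]
    -- r2 preserves the prefix up to m+1
    have pre2' : r2.1.take (m.toNat + 1) = r1.1.take (m.toNat + 1) := by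
      rw [← hm1]; exact pre2
    have suf2' : r2.1.drop (e.toNat + 1) = arr.drop (e.toNat + 1) := by
      rw [suf2]
      exact pvDrop_mono suf1 (by omega)
    have pre2s : r2.1.take s.toNat = arr.take s.toNat := by
      rw [pvTake_mono pre2' (by omega : s.toNat ≤ m.toNat + 1), pre1]
    have segL2 : pvSeg r2.1 s m = pvSeg r1.1 s m := by
      rw [pvSeg_eq_drop_take, pvSeg_eq_drop_take, pre2']
    -- the reads of merge_and_count
    have hlen2 : r2.1.length = arr.length := by rw [len2, len1]
    have hleft : (PySem.List.pyRange s (m + 1) 1).map (fun i => PySem.List.pyGetD r2.1 i 0)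
        = pvSeg r2.1 s m := by
      rw [pvReadSeg r2.1 s (m + 1) h0 (by omega) (by rw [hlen2]; omega)]
      unfold pvSeg
      congr 1
      omega
    have hright : (PySem.List.pyRange (m + 1) (e + 1) 1).map (fun i => PySem.List.pyGetD r2.1 i 0)
        = pvSeg r2.1 (m + 1) e := by
      rw [pvReadSeg r2.1 (m + 1) (e + 1) (by omega) (by omega) (by rw [hlen2]; omega)]
      unfold pvSeg
      congr 1
      omega
    set left := pvSeg r2.1 s m with hL
    set right := pvSeg r2.1 (m + 1) e with hR
    have permL : left.Perm (pvSeg arr s m) := by rw [segL2]; exact perm1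
    have permR : right.Perm (pvSeg arr (m + 1) e) := by rw [← segR1]; exact perm2
    have lenL : left.length = m.toNat + 1 - s.toNat := by
      have := permL.length_eq
      unfold pvSeg at this
      simp only [List.length_take, List.length_drop] at this
      omega
    have lenR : right.length = e.toNat - m.toNat := by
      have := permR.length_eq
      unfold pvSeg at this
      simp only [List.length_take, List.length_drop] at this
      omega
    -- the counting part of merge_and_count
    have hsorted : (PySem.List.sorted (right.map (fun v => v * v)) (fun q => q) false).Pairwise (· ≤ ·) :=
      PySem.List.sorted_pairwise _ _
    have hcount : ∀ x : Int, pvCount (PySem.List.sorted (right.map (fun v => v * v)) (fun q => q) false) x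
        = (right.countP (fun v => v * v < x) : Int) := by
      intro x
      rw [pvCount_eq _ _ hsorted]
      rw [(PySem.List.sorted_perm (right.map (fun v => v * v)) (fun q => q) false).countP_eq]
      rw [List.countP_map]
      rfl
    have htotal : left.foldl (fun t x => t + pvCount (PySem.List.sorted (right.map (fun v => v * v)) (fun q => q) false) x) 0
        = pvCross left right := by
      rw [PySem.List.foldl_add]
      unfold pvCross
      rw [List.map_congr_left (fun x _ => hcount x)]
      simp
    -- the write-back
    set w := pvMSuffix left right 0 0 with hw
    have hwperm : w.Perm (left ++ right) := by
      have := pvMSuffix_perm left right 0 0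
      simpa using this
    have hwlen : w.length = (e.toNat + 1) - s.toNat := by
      rw [hwperm.length_eq]
      simp only [List.length_append]
      omega
    have hwrite : pvMergeLoop (left.length + right.length) r2.1 left right 0 0 s
        = r2.1.take s.toNat ++ w ++ r2.1.drop (e.toNat + 1) := by
      rw [pvMergeLoop_eq left right (left.length + right.length) 0 0 (by omega), ← hw]
      rw [pvWriteSeq_eq w r2.1 s h0 (by rw [hwlen, hlen2]; omega)]
      congr 2
      omega
    -- assemble: one unfolding of the main function
    have hstep : pvMergeSortAux (fuel + 1) arr s e
        = ((pvMergeAndCount r2.1 s m e).1, r1.2 + r2.2 + (pvMergeAndCount r2.1 s m e).2) := by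
      rw [pvMergeSortAux, if_pos hlt]
    have hmc : pvMergeAndCount r2.1 s m e
        = (r2.1.take s.toNat ++ w ++ r2.1.drop (e.toNat + 1), pvCross left right) := by
      unfold pvMergeAndCount
      simp only [hleft, hright, htotal, hwrite]
    rw [hstep, hmc]
    have segsplit := pvSeg_split arr s m e h0 (by omega) hme
    have permw : w.Perm (pvSeg arr s e) := by
      rw [segsplit]
      exact hwperm.trans (permL.append permR)
    constructor
    · -- length
      simp only [List.length_append, List.length_take, List.length_drop]
      omega
    refine ⟨?_, ?_, ?_, ?_⟩
    · -- prefix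
      rw [List.append_assoc, List.take_append]
      simp only [List.length_take]
      have h1 : s.toNat - min s.toNat r2.1.length = 0 := by omega
      rw [h1, List.take_take]
      simp only [Nat.min_self, List.take_zero, List.append_nil]
      exact pre2s
    · -- suffix
      rw [List.append_assoc, List.drop_append]
      have h1 : List.drop (e.toNat + 1) (List.take s.toNat r2.1) = [] := by
        apply List.drop_eq_nil_of_le
        simp only [List.length_take]
        omega
      rw [h1]
      simp only [List.length_take, List.nil_append]
      rw [List.drop_append]
      have h2 : e.toNat + 1 - min s.toNat r2.1.length - w.length = 0 := by
        rw [hwlen]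
        omega
      have h3 : List.drop (e.toNat + 1 - min s.toNat r2.1.length) w = [] := by
        apply List.drop_eq_nil_of_le
        rw [hwlen]
        omega
      rw [h2, h3, List.drop_zero, List.nil_append]
      exact suf2'
    · -- segment permutation
      have hseg3 : pvSeg (r2.1.take s.toNat ++ w ++ r2.1.drop (e.toNat + 1)) s e = w := by
        unfold pvSeg
        rw [List.append_assoc, List.drop_append]
        have h1 : List.drop s.toNat (List.take s.toNat r2.1) = [] := by
          apply List.drop_eq_nil_of_le
          simp only [List.length_take]
          omega
        have h2 : s.toNat - (List.take s.toNat r2.1).length = 0 := by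
          simp only [List.length_take]
          omega
        rw [h1, h2, List.drop_zero, List.nil_append, List.take_append]
        have h3 : e.toNat + 1 - s.toNat - w.length = 0 := by omega
        rw [h3, List.take_zero, List.append_nil, List.take_of_length_le (by omega)]
      rw [hseg3]
      exact permw
    · -- the count
      rw [c1, c2, segR1, segsplit, pvPairs_append]
      have hcross : pvCross left right = pvCross (pvSeg arr s m) (pvSeg arr (m + 1) e) := by
        rw [pvCross_perm_left permL, pvCross_perm_right _ permR]
      rw [hcross]
      ring

-- ===== VERDICT (by name: the statement is the Claim_ definition above) =====
theorem merge_sort_count_spec : Claim_equal_merge_sort_count := by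
  intro my_arr start end_ hdom hpre
  unfold Spec_merge_sort_count merge_sort_count merge_sort_count_alt
  by_cases hlt : start < end_
  · obtain ⟨h0, he⟩ := hpre hlt
    rw [if_neg (by omega : ¬ start ≥ end_)]
    have inv := (pvMergeSort_invariant ((end_ - start).toNat + 1) my_arr start end_
      (by omega) h0 he).2.2.2.2
    rw [inv, pvBLoop_eq]
    have hslice : PySem.List.slice my_arr (some start) (some (end_ + 1))
        = pvSeg my_arr start end_ := by
      rw [PySem.List.slice_toNat my_arr h0 (by omega : (0:Int) ≤ end_ + 1)]
      unfold pvSeg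
      congr 1
      omega
    rw [hslice]
    omega
  · rw [pvMergeSortAux, if_neg hlt, if_pos (by omega : start ≥ end_)]
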